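-- pv_equiv track=rewrite | github.com/MF270/gset-22-midi | instrument_data.py | classify_inst
-- ===== SOURCE A (Python) =====
-- def classify_inst(inst:int) -> str:
--     ranges = [list(range((8*i),(8*(i+1)))) for i in range(16)]
--     families = ["Piano", "Chromatic Percussion", "Organ", "Guitar", "Bass",
--     "Strings", "Ensemble", "Brass", "Reed", "Pipe", "Synth Lead", "Synth Pad", "Synth Effects", "Ethnic", "Percussive", "Sound Effects"]
--     classifications = {j:i for i,j in zip(ranges,families)}
--     for j,i in classifications.items():
--         if inst in i:
--             return j
-- ===== SOURCE B (Python) =====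
-- FAMILIES = ["Piano", "Chromatic Percussion", "Organ", "Guitar", "Bass",
--             "Strings", "Ensemble", "Brass", "Reed", "Pipe", "Synth Lead",
--             "Synth Pad", "Synth Effects", "Ethnic", "Percussive", "Sound Effects"]
--
-- def classify_inst(inst: int) -> str:
--     if 0 <= inst < 128:
--         return FAMILIES[inst // 8]
--     return None
-- ===== Notes on version B (the rewrite author's own statement) =====
-- stated objective: simpler
-- what changed: Replaces the 16 built range-lists, the dict comprehension and the linear membership scan with a single arithmetic bucket lookup families[inst // 8] guarded by 0 <= inst < 128.
-- outside the precondition, e.g. on classify_inst(200): A returns None, B returns None; on classify_inst(-1): A returns None, B returns None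
import Mathlib
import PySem

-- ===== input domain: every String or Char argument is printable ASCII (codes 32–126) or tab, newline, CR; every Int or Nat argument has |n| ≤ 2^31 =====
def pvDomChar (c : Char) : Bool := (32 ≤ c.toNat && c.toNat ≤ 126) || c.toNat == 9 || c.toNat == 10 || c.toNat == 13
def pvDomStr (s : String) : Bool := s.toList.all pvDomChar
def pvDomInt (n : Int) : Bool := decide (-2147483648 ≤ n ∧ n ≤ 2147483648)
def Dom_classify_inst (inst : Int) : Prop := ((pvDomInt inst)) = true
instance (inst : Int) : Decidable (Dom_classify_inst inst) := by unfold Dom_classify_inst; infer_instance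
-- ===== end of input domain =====

-- B replaces A's range-building, dict comprehension and membership scan by one arithmetic
-- bucket lookup families[inst // 8]; equal on Pre_ (0 ≤ inst < 128, where A returns a string).

-- ===== PORT A =====
-- the families literal of A
def pvFamiliesA : List String :=
  ["Piano", "Chromatic Percussion", "Organ", "Guitar", "Bass",
   "Strings", "Ensemble", "Brass", "Reed", "Pipe", "Synth Lead", "Synth Pad",
   "Synth Effects", "Ethnic", "Percussive", "Sound Effects"]

-- the for-loop with early return: first (j, i) with inst in i yields some j, else none (Python's None)
def pvScanA (inst : Int) : List (String × List Int) → Option String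
  | [] => none
  | (j, i) :: rest => if inst ∈ i then some j else pvScanA inst rest

def classify_inst (inst : Int) : String :=
  let ranges := (PySem.List.pyRange 0 16 1).map (fun i => PySem.List.pyRange (8 * i) (8 * (i + 1)) 1)
  let families := pvFamiliesA
  -- {j:i for i,j in zip(ranges,families)}: keys (families) are distinct, so the dict in
  -- insertion order is exactly the association list zip families ranges
  let classifications := families.zip ranges
  -- A returns None (no string) when the loop falls through; that is outside Pre_, default ""
  (pvScanA inst classifications).getD ""

-- ===== PORT B =====
def pvFAMILIES : List String :=
  ["Piano", "Chromatic Percussion", "Organ", "Guitar", "Bass",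
   "Strings", "Ensemble", "Brass", "Reed", "Pipe", "Synth Lead", "Synth Pad",
   "Synth Effects", "Ethnic", "Percussive", "Sound Effects"]

def classify_inst_alt (inst : Int) : String :=
  if 0 ≤ inst ∧ inst < 128 then
    PySem.List.pyGetD pvFAMILIES (PySem.Int.floordiv inst 8) ""
  else
    ""  -- Python B returns None here; outside Pre_

-- ===== PRECONDITION & SPEC =====
-- Pre_ excludes exactly the inputs where A's loop falls through and returns None (not a str):
-- inst < 0 or inst ≥ 128.
def Pre_classify_inst (inst : Int) : Prop := 0 ≤ inst ∧ inst < 128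
instance (inst : Int) : Decidable (Pre_classify_inst inst) := by unfold Pre_classify_inst; infer_instance
def pvWitness_classify_inst : Int := (10)

def Spec_classify_inst (inst : Int) (out : String) : Prop := out = classify_inst_alt inst
instance (inst : Int) (out : String) : Decidable (Spec_classify_inst inst out) := by unfold Spec_classify_inst; infer_instance

-- ===== CLAIM (what is proved, stated in full; the proofs are below) =====
def Claim_equal_classify_inst : Prop := ∀ (inst : Int), Dom_classify_inst inst → Pre_classify_inst inst → Spec_classify_inst inst (classify_inst inst)

-- ===== LEMMAS AND PROOFS =====
theorem classify_inst_eq_alt_of_lt (n : Nat) (h : n < 128) :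
    classify_inst (n : Int) = classify_inst_alt (n : Int) := by
  revert h; revert n; decide

-- ===== VERDICT (by name: the statement is the Claim_ definition above) =====
theorem classify_inst_spec : Claim_equal_classify_inst := by
  intro inst _ hpre
  obtain ⟨h0, h1⟩ := hpre
  have hn : inst = (inst.toNat : Int) := (Int.toNat_of_nonneg h0).symm
  unfold Spec_classify_inst
  rw [hn]
  exact classify_inst_eq_alt_of_lt inst.toNat (by omega)
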